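-- pv_equiv track=rewrite | github.com/bossxxws/cmpsci-learn-practice | 编程文件(python)/cloud campus作业/Lab11-递归2/03.py | get_min_odd
-- ===== SOURCE A (Python) =====
-- def get_min_odd(numbers):
--     #返回最小奇数,没有就返回9999
--     if len(numbers)==0:
--         return 9999
--     else:
--         if numbers[0]%2!=0 and numbers[0]<get_min_odd(numbers[1:]):
--             return numbers[0]
--         else:
--             return get_min_odd(numbers[1:])
-- ===== SOURCE B (Python) =====
-- def get_min_odd(numbers):
--     # Single linear pass: track the smallest odd seen, defaulting to 9999.
--     result = 9999
--     for x in numbers: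
--         if x % 2 != 0 and x < result:
--             result = x
--     return result
-- ===== Notes on version B (the rewrite author's own statement) =====
-- stated objective: faster
-- what changed: Replaced the double-recursive scan (which recomputes the suffix result twice per element, exponential in n) with a single iterative pass folding the smallest odd seen so far, default 9999; intended as faster: the probe saw A time out on most n=64 inputs where B returned instantly, but could not confirm a ratio on enough inputs.
import Mathlib
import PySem

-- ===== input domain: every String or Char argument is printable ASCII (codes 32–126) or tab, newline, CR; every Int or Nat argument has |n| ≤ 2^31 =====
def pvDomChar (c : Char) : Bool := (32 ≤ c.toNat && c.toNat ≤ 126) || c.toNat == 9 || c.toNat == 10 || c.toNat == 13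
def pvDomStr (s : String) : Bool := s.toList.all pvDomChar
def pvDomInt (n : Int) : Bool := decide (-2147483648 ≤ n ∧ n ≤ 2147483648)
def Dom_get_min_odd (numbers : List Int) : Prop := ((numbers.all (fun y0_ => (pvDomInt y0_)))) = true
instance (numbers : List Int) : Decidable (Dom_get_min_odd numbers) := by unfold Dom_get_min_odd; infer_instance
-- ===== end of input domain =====

-- B replaces A's double recursion by one linear fold tracking the minimum odd (default 9999);
-- intended as faster; a timing run saw A time out on most n=64 inputs where B returned, but could not confirm a ratio.
-- ===== PORT A =====
def get_min_odd : List Int → Int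
  | [] => 9999
  | x :: rest =>
    if PySem.Int.mod x 2 ≠ 0 ∧ x < get_min_odd rest then x
    else get_min_odd rest

-- ===== PORT B =====
-- B: one linear pass folding the smallest odd seen so far, default 9999.
def get_min_odd_alt (numbers : List Int) : Int :=
  numbers.foldl (fun result x => if PySem.Int.mod x 2 ≠ 0 ∧ x < result then x else result) 9999

-- ===== PRECONDITION & SPEC =====
def Spec_get_min_odd (numbers : List Int) (out : Int) : Prop := out = get_min_odd_alt numbers
instance (numbers : List Int) (out : Int) : Decidable (Spec_get_min_odd numbers out) := by unfold Spec_get_min_odd; infer_instance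

-- ===== CLAIM (what is proved, stated in full; the proofs are below) =====
def Claim_equal_get_min_odd : Prop := ∀ (numbers : List Int), Dom_get_min_odd numbers → Spec_get_min_odd numbers (get_min_odd numbers)

-- ===== LEMMAS AND PROOFS =====

theorem get_min_odd_le (l : List Int) : get_min_odd l ≤ 9999 := by
  induction l with
  | nil => simp [get_min_odd]
  | cons x rest ih =>
    simp only [get_min_odd]
    split_ifs with h
    · omega
    · exact ih

theorem foldl_min_odd (l : List Int) (r : Int) (hr : r ≤ 9999) :
    l.foldl (fun result x => if PySem.Int.mod x 2 ≠ 0 ∧ x < result then x else result) r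
      = if get_min_odd l < r then get_min_odd l else r := by
  induction l generalizing r with
  | nil => simp only [List.foldl, get_min_odd]; rw [if_neg (by omega)]
  | cons x rest ih =>
    have hle := get_min_odd_le rest
    simp only [List.foldl, get_min_odd]
    by_cases hodd : PySem.Int.mod x 2 ≠ 0
    · by_cases hxr : x < r
      · rw [if_pos ⟨hodd, hxr⟩, ih x (by omega)]
        split_ifs <;> omega
      · rw [if_neg (by tauto), ih r hr]
        split_ifs <;> omega
    · have h1 : ¬(PySem.Int.mod x 2 ≠ 0 ∧ x < r) := fun h => hodd h.1
      have h2 : ¬(PySem.Int.mod x 2 ≠ 0 ∧ x < get_min_odd rest) := fun h => hodd h.1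
      rw [if_neg h1, ih r hr, if_neg h2]

-- ===== VERDICT (by name: the statement is the Claim_ definition above) =====
theorem get_min_odd_spec : Claim_equal_get_min_odd := by
  intro numbers _
  unfold Spec_get_min_odd get_min_odd_alt
  rw [foldl_min_odd numbers 9999 le_rfl]
  have := get_min_odd_le numbers
  split_ifs <;> omega
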